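-- pv_equiv track=rewrite | github.com/dig-team/FLORA | eval.py | bilateral_max_assign
-- ===== SOURCE A (Python) =====
-- def bilateral_max_assign(sameASscore):
--     match_e1_to_e2, match_e2_to_e1 = {}, {}
--     for e1, matches in sameASscore.items():
--         if matches:
--             max_score = max(matches.values())
--             for e2 in matches:
--                 if matches[e2] == max_score:
--                     if e1 not in match_e1_to_e2:
--                         match_e1_to_e2[e1] = {}
--                     match_e1_to_e2[e1][e2] = matches[e2]
--                     if e2 not in match_e2_to_e1:
--                         match_e2_to_e1[e2] = {}
--                         match_e2_to_e1[e2][e1] = matches[e2]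
--                         continue
--
--                     max_score_e2 = max(match_e2_to_e1[e2].values())
--                     if matches[e2] > max_score_e2:
--                         match_e2_to_e1[e2] = {e1: matches[e2]}
--                     elif max_score_e2 == matches[e2]:
--                         match_e2_to_e1[e2][e1] = matches[e2]
--     res_max_assign = {} # bilateral max assignment
--     for e2 in match_e2_to_e1:
--         # exact match case, avoid duplicates
--         if e2 in match_e2_to_e1[e2]:
--             res_max_assign[e2] = {e2: match_e2_to_e1[e2][e2]}
--             continue
--         for e1 in match_e2_to_e1[e2]:
--             if e1 in match_e1_to_e2 and e2 in match_e1_to_e2.get(e1, {}):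
--                 if e2 not in res_max_assign:
--                     res_max_assign[e2] = {}
--                 res_max_assign[e2][e1] = match_e1_to_e2[e1][e2]
--                 if e1 not in res_max_assign:
--                     res_max_assign[e1] = {}
--                 res_max_assign[e1][e2] = match_e2_to_e1[e2][e1]
--     return res_max_assign
-- ===== SOURCE B (Python) =====
-- def bilateral_max_assign(sameASscore):
--     # Index the forward edges (row maxima) by target once; no running best,
--     # no comparisons during the pass: each bucket keeps its raw (source, score) pairs.
--     buckets = {}
--     for e1, matches in sameASscore.items():
--         if matches:
--             top = max(matches.values())
--             for e2, s in matches.items():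
--                 if s == top:
--                     buckets.setdefault(e2, []).append((e1, s))
--     # Per bucket, take the max and its ties declaratively, then emit symmetrically.
--     res = {}
--     for e2, bucket in buckets.items():
--         top = max(s for _, s in bucket)
--         e1s = [e1 for e1, s in bucket if s == top]
--         if e2 in e1s:
--             res[e2] = {e2: top}
--             continue
--         for e1 in e1s:
--             res.setdefault(e2, {})[e1] = top
--             res.setdefault(e1, {})[e2] = top
--     return res
-- ===== Notes on version B (the rewrite author's own statement) =====
-- stated objective: alternative
-- what changed: A threads two dict-of-dict tables, rescanning max(match_e2_to_e1[e2].values()) on every tied insertion and cross-checking match_e1_to_e2 on emission; B instead buckets the forward edges (row maxima) by target in one comparison-free pass and then takes each bucket's max and its ties declaratively, so the per-insertion rescans and the second table disappear.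
import Mathlib
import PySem

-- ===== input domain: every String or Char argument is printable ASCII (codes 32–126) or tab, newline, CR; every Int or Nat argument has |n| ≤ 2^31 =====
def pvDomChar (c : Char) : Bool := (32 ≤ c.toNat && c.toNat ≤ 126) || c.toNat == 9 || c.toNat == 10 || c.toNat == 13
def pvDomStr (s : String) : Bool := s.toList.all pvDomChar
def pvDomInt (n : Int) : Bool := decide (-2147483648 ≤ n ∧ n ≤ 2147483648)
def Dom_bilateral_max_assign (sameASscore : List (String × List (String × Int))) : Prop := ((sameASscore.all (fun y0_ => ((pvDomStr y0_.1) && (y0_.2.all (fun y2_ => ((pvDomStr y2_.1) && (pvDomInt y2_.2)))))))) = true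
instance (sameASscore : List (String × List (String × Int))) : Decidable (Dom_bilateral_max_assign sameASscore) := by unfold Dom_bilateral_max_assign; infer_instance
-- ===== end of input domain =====

-- B replaces A's two incrementally-updated dict-of-dict tables (with their per-insertion
-- rescans and cross-checks) by one comparison-free pass bucketing the forward edges by
-- target, then a declarative max/ties per bucket; return values proved equal on dict-shaped inputs.

-- ===== PORT A =====
-- inner loop body: `for e2 in matches: if matches[e2] == max_score: …`
-- (keys of the dict `matches` are unique on Pre_, so `matches[e2]` is the paired value p.2)
def pvA_inner (e1 : String) (top : Int)
    (st : PySem.Dict String (PySem.Dict String Int) × PySem.Dict String (PySem.Dict String Int))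
    (p : String × Int) :
    PySem.Dict String (PySem.Dict String Int) × PySem.Dict String (PySem.Dict String Int) :=
  if p.2 == top then
    let m12a := if st.1.contains e1 then st.1 else st.1.insert e1 PySem.Dict.empty
    let m12b := m12a.insert e1 ((m12a.getD e1 PySem.Dict.empty).insert p.1 p.2)
    if st.2.contains p.1 = false then
      (m12b, st.2.insert p.1 (PySem.Dict.empty.insert e1 p.2))
    else
      match PySem.List.max? (st.2.getD p.1 PySem.Dict.empty).values (fun y => y) with
      | none => (m12b, st.2)  -- unreachable: the row is nonempty whenever this branch runs
      | some max2 =>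
        if p.2 > max2 then (m12b, st.2.insert p.1 (PySem.Dict.empty.insert e1 p.2))
        else if max2 == p.2 then
          (m12b, st.2.insert p.1 ((st.2.getD p.1 PySem.Dict.empty).insert e1 p.2))
        else (m12b, st.2)
  else st

-- `if matches: max_score = max(matches.values()); for e2 in matches: …`
def pvA_row (st : PySem.Dict String (PySem.Dict String Int) × PySem.Dict String (PySem.Dict String Int))
    (row : String × List (String × Int)) :
    PySem.Dict String (PySem.Dict String Int) × PySem.Dict String (PySem.Dict String Int) :=
  match PySem.List.max? (row.2.map (fun q => q.2)) (fun y => y) with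
  | none => st
  | some top => row.2.foldl (pvA_inner row.1 top) st

-- second loop body: one `e2` of `match_e2_to_e1` with its row `d2`
def pvA_pair (m12 : PySem.Dict String (PySem.Dict String Int))
    (res : PySem.Dict String (PySem.Dict String Int)) (e2 : String)
    (d2 : PySem.Dict String Int) : PySem.Dict String (PySem.Dict String Int) :=
  if d2.contains e2 then res.insert e2 (PySem.Dict.empty.insert e2 (d2.getD e2 0))
  else d2.items.foldl (fun r q =>
    if m12.contains q.1 && (m12.getD q.1 PySem.Dict.empty).contains e2 then
      let ra := if r.contains e2 then r else r.insert e2 PySem.Dict.empty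
      let rb := ra.insert e2 ((ra.getD e2 PySem.Dict.empty).insert q.1
        ((m12.getD q.1 PySem.Dict.empty).getD e2 0))
      let rc := if rb.contains q.1 then rb else rb.insert q.1 PySem.Dict.empty
      rc.insert q.1 ((rc.getD q.1 PySem.Dict.empty).insert e2 (d2.getD q.1 0))
    else r) res

def bilateral_max_assign (sameASscore : List (String × List (String × Int))) : List (String × List (String × Int)) :=
  let st := sameASscore.foldl pvA_row (PySem.Dict.empty, PySem.Dict.empty)
  let res := st.2.items.foldl (fun r q => pvA_pair st.1 r q.1 q.2) PySem.Dict.empty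
  res.items.map (fun q => (q.1, q.2.items))

-- ===== PORT B =====
-- phase 1 of Source B: `if matches: top = max(...); for e2, s in matches.items(): if s == top:
-- buckets.setdefault(e2, []).append((e1, s))` — the setdefault+append is Dict.modify with default []
def pvB_collect (b : PySem.Dict String (List (String × Int)))
    (row : String × List (String × Int)) : PySem.Dict String (List (String × Int)) :=
  match PySem.List.max? (row.2.map (fun q => q.2)) (fun y => y) with
  | none => b
  | some top => row.2.foldl (fun b q =>
      if q.2 == top then b.modify q.1 [] (fun l => l ++ [(row.1, q.2)]) else b) b

-- the emission lines shared by both branches of Source B's per-bucket body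
def pvB_pair (res : PySem.Dict String (PySem.Dict String Int)) (e2 : String) (sc : Int)
    (e1s : List String) : PySem.Dict String (PySem.Dict String Int) :=
  if e1s.contains e2 then res.insert e2 (PySem.Dict.empty.insert e2 sc)
  else e1s.foldl (fun r e1 =>
    let r1 := r.setdefault e2 PySem.Dict.empty
    let r2 := r1.insert e2 ((r1.getD e2 PySem.Dict.empty).insert e1 sc)
    let r3 := r2.setdefault e1 PySem.Dict.empty
    r3.insert e1 ((r3.getD e1 PySem.Dict.empty).insert e2 sc)) res

-- one entry of `buckets.items()`: take the bucket's max and its ties, then emit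
def pvB_emit (res : PySem.Dict String (PySem.Dict String Int)) (e2 : String)
    (bucket : List (String × Int)) : PySem.Dict String (PySem.Dict String Int) :=
  match PySem.List.max? (bucket.map (fun q => q.2)) (fun y => y) with
  | none => res  -- unreachable: a bucket is only ever created by appending a pair
  | some top =>
    pvB_pair res e2 top ((bucket.filter (fun q => q.2 == top)).map (fun q => q.1))

def bilateral_max_assign_alt (sameASscore : List (String × List (String × Int))) : List (String × List (String × Int)) :=
  let buckets := sameASscore.foldl pvB_collect PySem.Dict.empty
  let res := buckets.items.foldl (fun r q => pvB_emit r q.1 q.2) PySem.Dict.empty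
  res.items.map (fun q => (q.1, q.2.items))

-- ===== PRECONDITION & SPEC =====
-- Pre_ excludes association lists with duplicate keys (outer or inner): A's parameter is a
-- Python dict of dicts, whose keys are unique by construction, so no excluded input encodes
-- an argument A is ever called on.
def Pre_bilateral_max_assign (sameASscore : List (String × List (String × Int))) : Prop :=
  (sameASscore.map (fun r => r.1)).Nodup ∧ ∀ r ∈ sameASscore, (r.2.map (fun q => q.1)).Nodup
instance (sameASscore : List (String × List (String × Int))) : Decidable (Pre_bilateral_max_assign sameASscore) := by unfold Pre_bilateral_max_assign; infer_instance

def pvWitness_bilateral_max_assign : (List (String × List (String × Int))) :=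
  [("a", [("b", 2), ("c", 2)]), ("b", [("a", 1)])]

def Spec_bilateral_max_assign (sameASscore : List (String × List (String × Int))) (out : List (String × List (String × Int))) : Prop := out = bilateral_max_assign_alt sameASscore
instance (sameASscore : List (String × List (String × Int))) (out : List (String × List (String × Int))) : Decidable (Spec_bilateral_max_assign sameASscore out) := by unfold Spec_bilateral_max_assign; infer_instance

-- ===== CLAIM (what is proved, stated in full; the proofs are below) =====
def Claim_equal_bilateral_max_assign : Prop := ∀ (sameASscore : List (String × List (String × Int))), Dom_bilateral_max_assign sameASscore → Pre_bilateral_max_assign sameASscore → Spec_bilateral_max_assign sameASscore (bilateral_max_assign sameASscore)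

-- ===== LEMMAS AND PROOFS =====

-- ---- proof-only intermediate: the incremental per-target fold (best score + argmax list) ----
def pvB_inner (e1 : String) (top : Int) (best : PySem.Dict String (Int × List String))
    (p : String × Int) : PySem.Dict String (Int × List String) :=
  if p.2 == top then
    match best.get? p.1 with
    | none => best.insert p.1 (p.2, [e1])
    | some c =>
      if p.2 > c.1 then best.insert p.1 (p.2, [e1])
      else if p.2 == c.1 then best.insert p.1 (c.1, c.2 ++ [e1])
      else best
  else best

def pvB_row (best : PySem.Dict String (Int × List String))
    (row : String × List (String × Int)) : PySem.Dict String (Int × List String) :=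
  match PySem.List.max? (row.2.map (fun q => q.2)) (fun y => y) with
  | none => best
  | some top => row.2.foldl (pvB_inner row.1 top) best

def pvMid (sameASscore : List (String × List (String × Int))) : List (String × List (String × Int)) :=
  let best := sameASscore.foldl pvB_row PySem.Dict.empty
  let res := best.items.foldl (fun r q => pvB_pair r q.1 q.2.1 q.2.2) PySem.Dict.empty
  res.items.map (fun q => (q.1, q.2.items))

-- the same step on one pre-filtered flat edge
def pvStep (b : PySem.Dict String (Int × List String)) (e : String × String × Int) :
    PySem.Dict String (Int × List String) :=
  match b.get? e.2.1 with
  | none => b.insert e.2.1 (e.2.2, [e.1])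
  | some c =>
    if e.2.2 > c.1 then b.insert e.2.1 (e.2.2, [e.1])
    else if e.2.2 == c.1 then b.insert e.2.1 (c.1, c.2 ++ [e.1])
    else b

-- the flat forward-edge list (proof-only view shared by both characterizations)
def pvB_forward (r : String × List (String × Int)) : List (String × String × Int) :=
  match PySem.List.max? (r.2.map (fun q => q.2)) (fun y => y) with
  | none => []
  | some top => (r.2.filter (fun q => q.2 == top)).map (fun q => (r.1, q.1, q.2))

def pvB_edges (xs : List (String × List (String × Int))) : List (String × String × Int) :=
  xs.flatMap pvB_forward

-- declarative per-target stats over the flat edge list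
def pvTop (es : List (String × String × Int)) (t : String) : Option Int :=
  PySem.List.max? ((es.filter (fun e => e.2.1 == t)).map (fun e => e.2.2)) (fun y => y)
def pvSrcs (es : List (String × String × Int)) (t : String) (m : Int) : List String :=
  (es.filter (fun e => e.2.1 == t && e.2.2 == m)).map (fun e => e.1)
def pvStat (es : List (String × String × Int)) (t : String) : Int × List String :=
  match pvTop es t with
  | none => (0, [])
  | some m => (m, pvSrcs es t m)

-- the row of A's match_e2_to_e1 that a best-entry (sc, l) stands for
def pvMkRow (sc : Int) (l : List String) : PySem.Dict String Int :=
  PySem.Dict.mk (l.map (fun a => (a, sc)))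

-- A's match_e2_to_e1 as a function of best
def pvConv (b : PySem.Dict String (Int × List String)) : PySem.Dict String (PySem.Dict String Int) :=
  PySem.Dict.mk (b.items.map (fun p => (p.1, pvMkRow p.2.1 p.2.2)))

-- invariant during the inner loop: rows are nonempty, every recorded e1 is either an
-- earlier outer key or the current one (then its e2 was already processed), and
-- match_e1_to_e2 holds the corresponding score
def pvInvIn (seen : List String) (e1 : String) (done : List String)
    (m12 : PySem.Dict String (PySem.Dict String Int))
    (best : PySem.Dict String (Int × List String)) : Prop :=
  ∀ p ∈ best.items, p.2.2 ≠ [] ∧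
    ∀ a ∈ p.2.2, (a ∈ seen ∨ (a = e1 ∧ p.1 ∈ done)) ∧
      ∃ d1, m12.get? a = some d1 ∧ d1.get? p.1 = some p.2.1

def pvInv (seen : List String)
    (m12 : PySem.Dict String (PySem.Dict String Int))
    (best : PySem.Dict String (Int × List String)) : Prop :=
  ∀ p ∈ best.items, p.2.2 ≠ [] ∧
    ∀ a ∈ p.2.2, a ∈ seen ∧
      ∃ d1, m12.get? a = some d1 ∧ d1.get? p.1 = some p.2.1

lemma pvMkRow_contains (sc : Int) (l : List String) (a : String) :
    (pvMkRow sc l).contains a = l.contains a := by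
  simp [pvMkRow, PySem.Dict.contains_mk, List.any_eq]

lemma pvMkRow_getD_mem (sc : Int) (l : List String) (a : String) (d0 : Int) (h : a ∈ l) :
    (pvMkRow sc l).getD a d0 = sc := by
  induction l with
  | nil => simp at h
  | cons b t ih =>
    rw [pvMkRow, List.map_cons, PySem.Dict.getD_eq_get?_getD, PySem.Dict.get?_mk_cons]
    by_cases hb : (b == a) = true
    · simp [hb]
    · rw [if_neg hb, ← PySem.Dict.getD_eq_get?_getD, ← pvMkRow]
      apply ih
      simp at hb
      rcases List.mem_cons.mp h with rfl | h'
      · exact absurd rfl hb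
      · exact h'

lemma pvMkRow_values (sc : Int) (l : List String) :
    (pvMkRow sc l).values = l.map (fun _ => sc) := by
  simp [pvMkRow, PySem.Dict.values, Function.comp_def]

lemma pvMkRow_insert_fresh (sc : Int) (l : List String) (a : String) (h : a ∉ l) :
    (pvMkRow sc l).insert a sc = pvMkRow sc (l ++ [a]) := by
  apply PySem.Dict.ext
  rw [PySem.Dict.items_insert_of_not_contains _ _ (by rw [pvMkRow_contains]; simpa using h)]
  simp [pvMkRow]

lemma pvConv_get? (b : PySem.Dict String (Int × List String)) (k : String) :
    (pvConv b).get? k = (b.get? k).map (fun c => pvMkRow c.1 c.2) := by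
  obtain ⟨l⟩ := b
  induction l with
  | nil => simp [pvConv, PySem.Dict.get?]
  | cons h t ih =>
    obtain ⟨a, v⟩ := h
    show (PySem.Dict.mk (((a, v) :: t).map (fun p => (p.1, pvMkRow p.2.1 p.2.2)))).get? k = _
    rw [List.map_cons, PySem.Dict.get?_mk_cons, PySem.Dict.get?_mk_cons]
    by_cases hak : a == k
    · simp [hak]
    · simp only [hak, if_false, Bool.false_eq_true]
      simpa [pvConv] using ih

lemma pvConv_contains (b : PySem.Dict String (Int × List String)) (k : String) :
    (pvConv b).contains k = b.contains k := by
  rw [PySem.Dict.contains_eq_isSome_get?, PySem.Dict.contains_eq_isSome_get?, pvConv_get?]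
  cases b.get? k <;> rfl

lemma pvConv_getD (b : PySem.Dict String (Int × List String)) (k : String) (c : Int × List String)
    (h : b.get? k = some c) : (pvConv b).getD k PySem.Dict.empty = pvMkRow c.1 c.2 := by
  rw [PySem.Dict.getD_eq_get?_getD, pvConv_get?, h]; rfl

lemma pvConv_insert (b : PySem.Dict String (Int × List String)) (k : String) (c : Int × List String) :
    pvConv (b.insert k c) = (pvConv b).insert k (pvMkRow c.1 c.2) := by
  apply PySem.Dict.ext
  show (b.insert k c).items.map _ = _
  by_cases hb : b.contains k
  · rw [PySem.Dict.items_insert_of_contains _ _ hb,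
      PySem.Dict.items_insert_of_contains _ _ (by rw [pvConv_contains]; exact hb)]
    show _ = (b.items.map _).map _
    rw [List.map_map, List.map_map]
    apply List.map_congr_left
    intro p _
    by_cases hp : p.1 = k <;> simp [hp]
  · rw [PySem.Dict.items_insert_of_not_contains _ _ (by simpa using hb),
      PySem.Dict.items_insert_of_not_contains _ _ (by rw [pvConv_contains]; simpa using hb)]
    show _ = b.items.map _ ++ _
    simp

lemma pv_max?_const (c : Int) (l : List String) (h : l ≠ []) :
    PySem.List.max? (l.map (fun _ => c)) (fun y => y) = some c := by
  cases l with
  | nil => simp at h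
  | cons b t =>
    rw [List.map_cons, PySem.List.max?_id_cons]
    congr 1
    induction t with
    | nil => rfl
    | cons x s ih => simpa using ih

lemma pv_empty_insert (e1 : String) (v : Int) :
    (PySem.Dict.empty : PySem.Dict String Int).insert e1 v = pvMkRow v [e1] := by
  apply PySem.Dict.ext
  rw [PySem.Dict.items_insert_of_not_contains _ _ (by simp)]
  rfl

lemma pv_invin_mono (seen : List String) (e1 : String) (done done' : List String)
    (m12 : PySem.Dict String (PySem.Dict String Int)) (best : PySem.Dict String (Int × List String))
    (hsub : ∀ x ∈ done, x ∈ done') (hInv : pvInvIn seen e1 done m12 best) :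
    pvInvIn seen e1 done' m12 best := by
  intro q hq
  obtain ⟨hne, hcl⟩ := hInv q hq
  refine ⟨hne, fun a ha => ?_⟩
  obtain ⟨hloc, hd⟩ := hcl a ha
  exact ⟨hloc.imp id (fun ⟨h1, h2⟩ => ⟨h1, hsub _ h2⟩), hd⟩

-- A's unconditional match_e1_to_e2 update preserves the m12 clauses of the invariant
lemma pv_m12_pres (seen : List String) (e1 : String) (done : List String) (k : String) (s : Int)
    (m12 : PySem.Dict String (PySem.Dict String Int)) (best : PySem.Dict String (Int × List String))
    (he1 : e1 ∉ seen) (hk : k ∉ done) (hInv : pvInvIn seen e1 done m12 best) :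
    pvInvIn seen e1 done
      ((if m12.contains e1 then m12 else m12.insert e1 PySem.Dict.empty).insert e1
        (((if m12.contains e1 then m12 else m12.insert e1 PySem.Dict.empty).getD e1 PySem.Dict.empty).insert k s))
      best := by
  intro q hq
  obtain ⟨hne, hcl⟩ := hInv q hq
  refine ⟨hne, fun a ha => ?_⟩
  obtain ⟨hloc, d1, hd1, hd1k⟩ := hcl a ha
  refine ⟨hloc, ?_⟩
  rcases hloc with hseen' | ⟨rfl, hdone⟩
  · have hne1 : a ≠ e1 := fun h => he1 (h ▸ hseen')
    refine ⟨d1, ?_, hd1k⟩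
    rw [PySem.Dict.get?_insert_of_ne _ _ hne1]
    by_cases hc : m12.contains e1
    · rw [if_pos hc]; exact hd1
    · rw [if_neg hc, PySem.Dict.get?_insert_of_ne _ _ hne1]; exact hd1
  · have hc : m12.contains a = true := by
      rw [PySem.Dict.contains_eq_isSome_get?, hd1]; rfl
    refine ⟨d1.insert k s, ?_, ?_⟩
    · rw [if_pos hc, PySem.Dict.getD_of_get?_eq_some _ _ hd1, PySem.Dict.get?_insert_self]
    · rw [PySem.Dict.get?_insert_of_ne _ _ (fun h => hk (by rw [← h]; exact hdone))]; exact hd1k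

-- adding / replacing the entry at k extends the invariant to done ++ [k]
lemma pv_invin_insert (seen : List String) (e1 : String) (done : List String)
    (m12' : PySem.Dict String (PySem.Dict String Int)) (best : PySem.Dict String (Int × List String))
    (k : String) (c' : Int × List String)
    (hbase : pvInvIn seen e1 done m12' best)
    (hnew : c'.2 ≠ [] ∧ ∀ a ∈ c'.2, (a ∈ seen ∨ (a = e1 ∧ k ∈ done ++ [k])) ∧
      ∃ d1, m12'.get? a = some d1 ∧ d1.get? k = some c'.1) :
    pvInvIn seen e1 (done ++ [k]) m12' (best.insert k c') := by
  intro q hq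
  rw [PySem.Dict.mem_items_insert] at hq
  rcases hq with rfl | ⟨hq, hq1⟩
  · exact hnew
  · exact pv_invin_mono seen e1 done (done ++ [k]) m12' best
      (fun x hx => List.mem_append_left _ hx) hbase q hq

lemma pv_step (e1 : String) (top : Int) (p : String × Int) (seen done : List String)
    (m12 : PySem.Dict String (PySem.Dict String Int)) (best : PySem.Dict String (Int × List String))
    (he1 : e1 ∉ seen) (hk : p.1 ∉ done) (hInv : pvInvIn seen e1 done m12 best) :
    ∃ m12', pvA_inner e1 top (m12, pvConv best) p = (m12', pvConv (pvB_inner e1 top best p))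
      ∧ pvInvIn seen e1 (done ++ [p.1]) m12' (pvB_inner e1 top best p) := by
  by_cases ht : (p.2 == top) = true
  · have hpres := pv_m12_pres seen e1 done p.1 p.2 m12 best he1 hk hInv
    simp only [pvA_inner, pvB_inner, if_pos ht]
    cases hbg : best.get? p.1 with
    | none =>
      have hcont : (pvConv best).contains p.1 = false := by
        rw [pvConv_contains, PySem.Dict.contains_eq_isSome_get?, hbg]; rfl
      rw [if_pos hcont]
      simp only []
      refine ⟨_, by rw [pvConv_insert, pv_empty_insert], ?_⟩
      apply pv_invin_insert seen e1 done _ best p.1 (p.2, [e1]) hpres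
      refine ⟨by simp, fun a ha => ?_⟩
      simp only [List.mem_singleton] at ha
      subst ha
      refine ⟨Or.inr ⟨rfl, by simp⟩, _, PySem.Dict.get?_insert_self _ _ _, PySem.Dict.get?_insert_self _ _ _⟩
    | some c =>
      have hcont : ¬ ((pvConv best).contains p.1 = false) := by
        rw [pvConv_contains, PySem.Dict.contains_eq_isSome_get?, hbg]; simp
      have hmem := PySem.Dict.mem_items_of_get?_eq_some _ hbg
      have hcne : c.2 ≠ [] := (hInv _ hmem).1
      have hfresh : e1 ∉ c.2 := by
        intro hmem2
        rcases ((hInv _ hmem).2 e1 hmem2).1 with h | ⟨_, h⟩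
        · exact he1 h
        · exact hk h
      rw [if_neg hcont, pvConv_getD best p.1 c hbg, pvMkRow_values, pv_max?_const _ _ hcne]
      simp only []
      by_cases hgt : p.2 > c.1
      · rw [if_pos hgt, if_pos hgt]
        refine ⟨_, by rw [pvConv_insert, pv_empty_insert], ?_⟩
        apply pv_invin_insert seen e1 done _ best p.1 (p.2, [e1]) hpres
        refine ⟨by simp, fun a ha => ?_⟩
        simp only [List.mem_singleton] at ha
        subst ha
        refine ⟨Or.inr ⟨rfl, by simp⟩, _, PySem.Dict.get?_insert_self _ _ _, PySem.Dict.get?_insert_self _ _ _⟩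
      · rw [if_neg hgt, if_neg hgt]
        by_cases heq : p.2 = c.1
        · have h1 : (c.1 == p.2) = true := by simpa using heq.symm
          have h2 : (p.2 == c.1) = true := by simpa using heq
          rw [if_pos h1, if_pos h2, heq]
          rw [heq] at hpres
          refine ⟨_, by rw [pvConv_insert, pvMkRow_insert_fresh _ _ _ hfresh], ?_⟩
          apply pv_invin_insert seen e1 done _ best p.1 (c.1, c.2 ++ [e1]) hpres
          refine ⟨by simp, fun a ha => ?_⟩
          rcases List.mem_append.mp ha with ha' | ha'
          · obtain ⟨hloc, hd⟩ := (hpres _ hmem).2 a ha'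
            exact ⟨hloc.imp id (fun ⟨h1, h2⟩ => ⟨h1, List.mem_append_left _ h2⟩), hd⟩
          · simp only [List.mem_singleton] at ha'
            subst ha'
            exact ⟨Or.inr ⟨rfl, by simp⟩, _, PySem.Dict.get?_insert_self _ _ _,
              PySem.Dict.get?_insert_self _ _ _⟩
        · have h1 : ¬ ((c.1 == p.2) = true) := by simpa using fun h => heq h.symm
          have h2 : ¬ ((p.2 == c.1) = true) := by simpa using heq
          rw [if_neg h1, if_neg h2]
          exact ⟨_, rfl, pv_invin_mono seen e1 done (done ++ [p.1]) _ best
            (fun x hx => List.mem_append_left _ hx) hpres⟩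
  · simp only [pvA_inner, pvB_inner, if_neg ht]
    exact ⟨m12, rfl, pv_invin_mono seen e1 done (done ++ [p.1]) m12 best
      (fun x hx => List.mem_append_left _ hx) hInv⟩

lemma pv_inv_to_invin (seen : List String) (e1 : String)
    (m12 : PySem.Dict String (PySem.Dict String Int)) (best : PySem.Dict String (Int × List String))
    (h : pvInv seen m12 best) : pvInvIn seen e1 [] m12 best := by
  intro q hq
  obtain ⟨hne, hcl⟩ := h q hq
  exact ⟨hne, fun a ha => ⟨Or.inl ((hcl a ha).1), (hcl a ha).2⟩⟩

lemma pv_invin_to_inv (seen : List String) (e1 : String) (done : List String)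
    (m12 : PySem.Dict String (PySem.Dict String Int)) (best : PySem.Dict String (Int × List String))
    (h : pvInvIn seen e1 done m12 best) : pvInv (seen ++ [e1]) m12 best := by
  intro q hq
  obtain ⟨hne, hcl⟩ := h q hq
  refine ⟨hne, fun a ha => ?_⟩
  obtain ⟨hloc, hd⟩ := hcl a ha
  rcases hloc with h' | ⟨rfl, _⟩
  · exact ⟨List.mem_append_left _ h', hd⟩
  · exact ⟨List.mem_append_right _ (List.mem_singleton_self _), hd⟩

lemma pv_inv_mono_seen (seen seen' : List String)
    (m12 : PySem.Dict String (PySem.Dict String Int)) (best : PySem.Dict String (Int × List String))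
    (hsub : ∀ x ∈ seen, x ∈ seen') (h : pvInv seen m12 best) : pvInv seen' m12 best := by
  intro q hq
  obtain ⟨hne, hcl⟩ := h q hq
  exact ⟨hne, fun a ha => ⟨hsub _ ((hcl a ha).1), (hcl a ha).2⟩⟩

lemma pv_inner_fold (e1 : String) (top : Int) (l : List (String × Int)) (seen done : List String)
    (m12 : PySem.Dict String (PySem.Dict String Int)) (best : PySem.Dict String (Int × List String))
    (hnd : (done ++ l.map (fun q => q.1)).Nodup) (he1 : e1 ∉ seen)
    (hInv : pvInvIn seen e1 done m12 best) :
    (l.foldl (pvA_inner e1 top) (m12, pvConv best)).2 = pvConv (l.foldl (pvB_inner e1 top) best)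
    ∧ pvInvIn seen e1 (done ++ l.map (fun q => q.1))
        (l.foldl (pvA_inner e1 top) (m12, pvConv best)).1 (l.foldl (pvB_inner e1 top) best) := by
  induction l generalizing done m12 best with
  | nil => exact ⟨rfl, by simpa using hInv⟩
  | cons p t ih =>
    have hnd' : ((done ++ [p.1]) ++ t.map (fun q => q.1)).Nodup := by
      simpa [List.append_assoc] using hnd
    have hp1 : p.1 ∉ done := by
      intro hmem
      have := (List.nodup_append.mp hnd).2.2
      exact this p.1 hmem p.1 (by simp) rfl
    obtain ⟨m12', hstep, hinv'⟩ := pv_step e1 top p seen done m12 best he1 hp1 hInv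
    rw [List.foldl_cons, hstep]
    have := ih (done ++ [p.1]) m12' (pvB_inner e1 top best p) hnd' hinv'
    simpa [List.append_assoc] using this

lemma pv_row_fold (xs : List (String × List (String × Int))) (seen : List String)
    (m12 : PySem.Dict String (PySem.Dict String Int)) (best : PySem.Dict String (Int × List String))
    (hnd : (seen ++ xs.map (fun r => r.1)).Nodup)
    (hin : ∀ r ∈ xs, (r.2.map (fun q => q.1)).Nodup)
    (hInv : pvInv seen m12 best) :
    (xs.foldl pvA_row (m12, pvConv best)).2 = pvConv (xs.foldl pvB_row best)
    ∧ pvInv (seen ++ xs.map (fun r => r.1))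
        (xs.foldl pvA_row (m12, pvConv best)).1 (xs.foldl pvB_row best) := by
  induction xs generalizing seen m12 best with
  | nil => exact ⟨rfl, by simpa using hInv⟩
  | cons r t ih =>
    have hr1 : r.1 ∉ seen := by
      intro hmem
      have := (List.nodup_append.mp hnd).2.2
      exact this r.1 hmem r.1 (by simp) rfl
    have hnd' : ((seen ++ [r.1]) ++ t.map (fun q => q.1)).Nodup := by
      simpa [List.append_assoc] using hnd
    rw [List.foldl_cons, List.foldl_cons]
    simp only [pvA_row, pvB_row]
    cases hm : PySem.List.max? (r.2.map (fun q => q.2)) (fun y => y) with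
    | none =>
      simp only []
      have := ih (seen ++ [r.1]) m12 best hnd' (fun x hx => hin x (List.mem_cons_of_mem _ hx))
        (pv_inv_mono_seen seen (seen ++ [r.1]) m12 best (fun x hx => List.mem_append_left _ hx) hInv)
      simpa [List.append_assoc] using this
    | some top =>
      simp only []
      obtain ⟨heq2, hinv2⟩ := pv_inner_fold r.1 top r.2 seen [] m12 best
        (by simpa using hin r (List.mem_cons_self ..)) hr1
        (pv_inv_to_invin seen r.1 m12 best hInv)
      have hst : r.2.foldl (pvA_inner r.1 top) (m12, pvConv best)
          = ((r.2.foldl (pvA_inner r.1 top) (m12, pvConv best)).1,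
             pvConv (r.2.foldl (pvB_inner r.1 top) best)) := by
        rw [← heq2]
      rw [hst]
      have := ih (seen ++ [r.1]) _ _ hnd' (fun x hx => hin x (List.mem_cons_of_mem _ hx))
        (pv_invin_to_inv seen r.1 _ _ _ (by simpa using hinv2))
      simpa [List.append_assoc] using this

lemma pv_pair_eq (m12 : PySem.Dict String (PySem.Dict String Int))
    (res : PySem.Dict String (PySem.Dict String Int)) (k : String) (sc : Int) (l : List String)
    (h : ∀ a ∈ l, ∃ d1, m12.get? a = some d1 ∧ d1.get? k = some sc) :
    pvA_pair m12 res k (pvMkRow sc l) = pvB_pair res k sc l := by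
  have hsd : ∀ (r : PySem.Dict String (PySem.Dict String Int)) (x : String),
      r.setdefault x PySem.Dict.empty = if r.contains x then r else r.insert x PySem.Dict.empty := by
    intro r x
    by_cases hx : r.contains x
    · rw [PySem.Dict.setdefault_of_contains _ _ hx, if_pos hx]
    · rw [PySem.Dict.setdefault_of_not_contains _ _ (by simpa using hx), if_neg hx]
  simp only [pvA_pair, pvB_pair, pvMkRow_contains, hsd]
  by_cases hc : l.contains k
  · rw [if_pos hc, if_pos hc, pvMkRow_getD_mem _ _ _ _ (by simpa using hc)]
  · rw [if_neg hc, if_neg hc]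
    have hitems : (pvMkRow sc l).items = l.map (fun a => (a, sc)) := rfl
    rw [hitems, List.foldl_map]
    apply PySem.List.foldl_congr_mem'
    intro a ha r
    obtain ⟨d1, hd1, hd1k⟩ := h a ha
    have hca : m12.contains a = true := by
      rw [PySem.Dict.contains_eq_isSome_get?, hd1]; rfl
    have hgd : m12.getD a PySem.Dict.empty = d1 := PySem.Dict.getD_of_get?_eq_some _ _ hd1
    have hck : d1.contains k = true := by
      rw [PySem.Dict.contains_eq_isSome_get?, hd1k]; rfl
    have hdk : d1.getD k 0 = sc := PySem.Dict.getD_of_get?_eq_some _ _ hd1k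
    simp only [hca, hgd, hck, hdk, Bool.and_self, if_pos, pvMkRow_getD_mem sc l a 0 ha]

lemma pv_phase2 (m12 : PySem.Dict String (PySem.Dict String Int))
    (items : List (String × Int × List String)) (res : PySem.Dict String (PySem.Dict String Int))
    (h : ∀ p ∈ items, ∀ a ∈ p.2.2, ∃ d1, m12.get? a = some d1 ∧ d1.get? p.1 = some p.2.1) :
    (items.map (fun p => (p.1, pvMkRow p.2.1 p.2.2))).foldl (fun r q => pvA_pair m12 r q.1 q.2) res
    = items.foldl (fun r q => pvB_pair r q.1 q.2.1 q.2.2) res := by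
  induction items generalizing res with
  | nil => rfl
  | cons q t ih =>
    rw [List.map_cons, List.foldl_cons, List.foldl_cons,
      pv_pair_eq m12 res q.1 q.2.1 q.2.2 (h q (List.mem_cons_self ..))]
    exact ih _ (fun p hp => h p (List.mem_cons_of_mem _ hp))

-- A equals the intermediate incremental form (the simulation proof)
lemma pv_A_eq_mid (xs : List (String × List (String × Int)))
    (hpre : Pre_bilateral_max_assign xs) : bilateral_max_assign xs = pvMid xs := by
  unfold bilateral_max_assign pvMid
  have h0 : pvInv ([] : List String) PySem.Dict.empty PySem.Dict.empty := by
    intro q hq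
    exact absurd hq (List.not_mem_nil)
  obtain ⟨heq2, hinv⟩ := pv_row_fold xs [] PySem.Dict.empty PySem.Dict.empty
    (by simpa using hpre.1) hpre.2 h0
  have hst2 : (xs.foldl pvA_row (PySem.Dict.empty, PySem.Dict.empty)).2
      = pvConv (xs.foldl pvB_row PySem.Dict.empty) := heq2
  have hinv' : pvInv (xs.map (fun r => r.1))
      (xs.foldl pvA_row (PySem.Dict.empty, PySem.Dict.empty)).1
      (xs.foldl pvB_row PySem.Dict.empty) := by simpa using hinv
  simp only []
  rw [hst2]
  have hitems : (pvConv (xs.foldl pvB_row PySem.Dict.empty)).items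
      = (xs.foldl pvB_row PySem.Dict.empty).items.map (fun p => (p.1, pvMkRow p.2.1 p.2.2)) := rfl
  rw [hitems, pv_phase2 _ _ _ (fun p hp a ha => ((hinv' p hp).2 a ha).2)]

-- ---- the incremental fold is the flat-edge fold ----
lemma pv_row_eq_edge_fold (b : PySem.Dict String (Int × List String))
    (r : String × List (String × Int)) :
    pvB_row b r = (pvB_forward r).foldl pvStep b := by
  unfold pvB_row pvB_forward
  cases hm : PySem.List.max? (r.2.map (fun q => q.2)) (fun y => y) with
  | none => rfl
  | some top =>
    simp only [List.foldl_map]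
    induction r.2 generalizing b with
    | nil => rfl
    | cons q t ih =>
      by_cases hq : (q.2 == top) = true
      · simp only [List.foldl_cons, List.filter_cons, hq, if_true]
        rw [show pvB_inner r.1 top b q = pvStep b (r.1, q.1, q.2) by
          simp only [pvB_inner, pvStep, if_pos hq]]
        exact ih _
      · simp only [List.foldl_cons, List.filter_cons, hq, if_false, Bool.false_eq_true]
        rw [show pvB_inner r.1 top b q = b by simp only [pvB_inner, if_neg hq]]
        exact ih _

lemma pv_fold_eq_edges (xs : List (String × List (String × Int)))
    (b : PySem.Dict String (Int × List String)) :
    xs.foldl pvB_row b = (pvB_edges xs).foldl pvStep b := by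
  induction xs generalizing b with
  | nil => rfl
  | cons r t ih =>
    rw [List.foldl_cons, pvB_edges, List.flatMap_cons, List.foldl_append,
      pv_row_eq_edge_fold, ih]
    rfl

-- ---- characterization of the flat-edge fold as a group-by ----
lemma pv_get?_map_key (f : String → Int × List String) (K : List String) (hK : K.Nodup) (t : String) :
    (PySem.Dict.mk (K.map (fun t => (t, f t)))).get? t = if t ∈ K then some (f t) else none := by
  induction K with
  | nil => simp [PySem.Dict.get?]
  | cons a s ih =>
    rw [List.map_cons, PySem.Dict.get?_mk_cons]
    by_cases hat : (a == t) = true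
    · have hea : a = t := by simpa using hat
      simp [hea]
    · have hne : a ≠ t := by simpa using hat
      rw [if_neg hat, ih (List.Nodup.of_cons hK)]
      by_cases hts : t ∈ s
      · rw [if_pos hts, if_pos (List.mem_cons_of_mem _ hts)]
      · rw [if_neg hts, if_neg (by simp [hts, Ne.symm hne])]

lemma pv_get?_of_items_map {f : String → Int × List String} (d : PySem.Dict String (Int × List String))
    (K : List String) (hK : K.Nodup) (h : d.items = K.map (fun t => (t, f t))) (t : String) :
    d.get? t = if t ∈ K then some (f t) else none := by
  have hd : d = PySem.Dict.mk (K.map (fun t => (t, f t))) := PySem.Dict.ext h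
  rw [hd]
  exact pv_get?_map_key f K hK t

lemma pv_dedup_append_singleton (l : List String) (x : String) :
    PySem.List.dedup (l ++ [x]) =
      if x ∈ PySem.List.dedup l then PySem.List.dedup l
      else PySem.List.dedup l ++ [x] := by
  rw [PySem.List.dedup_eq_ofList, PySem.List.dedup_eq_ofList, PySem.Set.ofList_eq_foldl,
    PySem.Set.ofList_eq_foldl, List.foldl_append, List.foldl_cons, List.foldl_nil]
  by_cases h : x ∈ List.foldl PySem.Set.add [] l
  · rw [if_pos h]; simp [PySem.Set.add, PySem.Set.contains, h]
  · rw [if_neg h]; simp [PySem.Set.add, PySem.Set.contains, h]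

lemma pv_max?_id_append_singleton (l : List Int) (m s : Int)
    (h : PySem.List.max? l (fun y => y) = some m) :
    PySem.List.max? (l ++ [s]) (fun y => y) = some (max m s) := by
  cases l with
  | nil => simp [PySem.List.max?] at h
  | cons a t =>
    rw [PySem.List.max?_id_cons] at h
    rw [List.cons_append, PySem.List.max?_id_cons, List.foldl_append]
    simp only [List.foldl_cons, List.foldl_nil]
    rw [Option.some_inj] at h
    rw [h]

-- membership in the target list ↔ the group is nonempty
lemma pv_mem_targets_iff (es : List (String × String × Int)) (t : String) :
    t ∈ PySem.List.dedup (es.map (fun e => e.2.1)) ↔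
      es.filter (fun e => e.2.1 == t) ≠ [] := by
  rw [PySem.List.mem_dedup, List.mem_map]
  constructor
  · rintro ⟨e, he, rfl⟩ h
    have : e ∈ es.filter (fun e' => e'.2.1 == e.2.1) := List.mem_filter.mpr ⟨he, by simp⟩
    rw [h] at this
    exact absurd this (List.not_mem_nil)
  · intro h
    rcases List.exists_mem_of_ne_nil _ h with ⟨e, he⟩
    obtain ⟨he', ht⟩ := List.mem_filter.mp he
    exact ⟨e, he', by simpa using ht⟩

lemma pv_stat_of_mem (es : List (String × String × Int)) (t : String)
    (h : t ∈ PySem.List.dedup (es.map (fun e => e.2.1))) :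
    ∃ m, pvTop es t = some m ∧ pvStat es t = (m, pvSrcs es t m) := by
  have hne : (es.filter (fun e => e.2.1 == t)).map (fun e => e.2.2) ≠ [] := by
    simpa using (pv_mem_targets_iff es t).mp h
  cases hm : pvTop es t with
  | none =>
    exact absurd ((PySem.List.max?_eq_none_iff _ _).mp hm) hne
  | some m =>
    exact ⟨m, rfl, by simp [pvStat, hm]⟩

-- one flat edge updates the group-by characterization exactly as pvStep
lemma pv_edge_fold_char (es : List (String × String × Int)) :
    (es.foldl pvStep PySem.Dict.empty).items
      = (PySem.List.dedup (es.map (fun e => e.2.1))).map (fun t => (t, pvStat es t)) := by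
  induction es using List.reverseRecOn with
  | nil => rfl
  | append_singleton es e ih =>
    have hKnd : (PySem.List.dedup (es.map (fun e => e.2.1))).Nodup := PySem.List.nodup_dedup _
    set K := PySem.List.dedup (es.map (fun e => e.2.1)) with hKdef
    have hget := pv_get?_of_items_map _ K hKnd ih
    have hdK : PySem.List.dedup ((es ++ [e]).map (fun e => e.2.1))
        = if e.2.1 ∈ K then K else K ++ [e.2.1] := by
      rw [List.map_append]
      simp only [List.map_cons, List.map_nil]
      rw [pv_dedup_append_singleton, ← hKdef]
    -- stats of untouched targets are unchanged
    have hother : ∀ t, t ≠ e.2.1 → pvStat (es ++ [e]) t = pvStat es t := by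
      intro t htne
      have hne' : e.2.1 ≠ t := Ne.symm htne
      have hfe : (es ++ [e]).filter (fun e' => e'.2.1 == t) = es.filter (fun e' => e'.2.1 == t) := by
        rw [List.filter_append]
        simp [hne']
      have hfe2 : ∀ m : Int, (es ++ [e]).filter (fun e' => e'.2.1 == t && e'.2.2 == m)
          = es.filter (fun e' => e'.2.1 == t && e'.2.2 == m) := by
        intro m
        rw [List.filter_append]
        simp [hne']
      simp only [pvStat, pvTop, pvSrcs, hfe, hfe2]
    rw [List.foldl_append, List.foldl_cons, List.foldl_nil, hdK]
    by_cases hmem : e.2.1 ∈ K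
    · -- existing target
      obtain ⟨m, htop, hstat⟩ := pv_stat_of_mem es e.2.1 hmem
      have hget0 : (es.foldl pvStep PySem.Dict.empty).get? e.2.1 = some (pvStat es e.2.1) := by
        rw [hget, if_pos hmem]
      rw [if_pos hmem]
      have hall : ∀ y ∈ (es.filter (fun e' => e'.2.1 == e.2.1)).map (fun e' => e'.2.2), y ≤ m :=
        fun y hy => PySem.List.max?_isMax htop y hy
      have hfilter1 : (es ++ [e]).filter (fun e' => e'.2.1 == e.2.1)
          = es.filter (fun e' => e'.2.1 == e.2.1) ++ [e] := by
        rw [List.filter_append]; simp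
      have htop' : pvTop (es ++ [e]) e.2.1 = some (max m e.2.2) := by
        rw [pvTop, hfilter1, List.map_append]
        exact pv_max?_id_append_singleton _ m e.2.2 htop
      rcases lt_trichotomy m e.2.2 with hlt | heq | hgt
      · -- new strict max: entry replaced by (s, [e1])
        have hstep : pvStep (es.foldl pvStep PySem.Dict.empty) e
            = (es.foldl pvStep PySem.Dict.empty).insert e.2.1 (e.2.2, [e.1]) := by
          rw [pvStep, hget0, hstat]
          simp only []
          rw [if_pos (by exact hlt)]
        have hstat' : pvStat (es ++ [e]) e.2.1 = (e.2.2, [e.1]) := by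
          have hsrcs : pvSrcs (es ++ [e]) e.2.1 e.2.2 = [e.1] := by
            rw [pvSrcs, List.filter_append]
            have : es.filter (fun e' => e'.2.1 == e.2.1 && e'.2.2 == e.2.2) = [] := by
              rw [List.filter_eq_nil_iff]
              intro e' he'
              simp only [Bool.and_eq_true, beq_iff_eq, not_and]
              intro ht1
              have : e'.2.2 ≤ m := hall e'.2.2
                (List.mem_map.mpr ⟨e', List.mem_filter.mpr ⟨he', by simp [ht1]⟩, rfl⟩)
              omega
            rw [this]
            simp
          simp only [pvStat, htop', max_eq_right (le_of_lt hlt), hsrcs]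
        rw [hstep, PySem.Dict.items_insert_of_contains _ _
          (by rw [PySem.Dict.contains_eq_isSome_get?, hget0]; rfl), ih]
        rw [List.map_map]
        apply List.map_congr_left
        intro t htK
        by_cases hte : t = e.2.1
        · subst hte
          simp [hstat']
        · simp only [Function.comp_apply]
          rw [if_neg (by simpa using hte), hother t hte]
      · -- equal max: e.1 appended to the sources
        have hstep : pvStep (es.foldl pvStep PySem.Dict.empty) e
            = (es.foldl pvStep PySem.Dict.empty).insert e.2.1 (m, pvSrcs es e.2.1 m ++ [e.1]) := by
          rw [pvStep, hget0, hstat]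
          simp only []
          rw [if_neg (by omega), if_pos (by simpa using heq.symm)]
        have hstat' : pvStat (es ++ [e]) e.2.1 = (m, pvSrcs es e.2.1 m ++ [e.1]) := by
          have hsrcs : pvSrcs (es ++ [e]) e.2.1 m = pvSrcs es e.2.1 m ++ [e.1] := by
            rw [pvSrcs, List.filter_append, pvSrcs]
            simp [← heq]
          simp only [pvStat, htop', max_eq_left (le_of_eq heq.symm), hsrcs]
        rw [hstep, PySem.Dict.items_insert_of_contains _ _
          (by rw [PySem.Dict.contains_eq_isSome_get?, hget0]; rfl), ih]
        rw [List.map_map]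
        apply List.map_congr_left
        intro t htK
        by_cases hte : t = e.2.1
        · subst hte
          simp [hstat']
        · simp only [Function.comp_apply]
          rw [if_neg (by simpa using hte), hother t hte]
      · -- below max: nothing changes
        have hstep : pvStep (es.foldl pvStep PySem.Dict.empty) e
            = es.foldl pvStep PySem.Dict.empty := by
          rw [pvStep, hget0, hstat]
          simp only []
          rw [if_neg (by omega), if_neg (by simpa using (by omega : ¬ e.2.2 = m))]
        have hstat' : pvStat (es ++ [e]) e.2.1 = pvStat es e.2.1 := by
          have hsrcs : pvSrcs (es ++ [e]) e.2.1 m = pvSrcs es e.2.1 m := by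
            rw [pvSrcs, List.filter_append, pvSrcs]
            have : e.2.2 ≠ m := by omega
            simp [this]
          simp only [pvStat, htop', max_eq_left (le_of_lt hgt), hsrcs, htop]
        rw [hstep, ih]
        apply List.map_congr_left
        intro t htK
        by_cases hte : t = e.2.1
        · subst hte
          rw [hstat', hstat]
        · rw [hother t hte]
    · -- new target: appended at the end
      have hget0 : (es.foldl pvStep PySem.Dict.empty).get? e.2.1 = none := by
        rw [hget, if_neg hmem]
      have hstep : pvStep (es.foldl pvStep PySem.Dict.empty) e
          = (es.foldl pvStep PySem.Dict.empty).insert e.2.1 (e.2.2, [e.1]) := by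
        rw [pvStep, hget0]
      have hgrp : es.filter (fun e' => e'.2.1 == e.2.1) = [] := by
        by_contra h
        exact hmem ((pv_mem_targets_iff es e.2.1).mpr h)
      have hstat' : pvStat (es ++ [e]) e.2.1 = (e.2.2, [e.1]) := by
        have h1 : (es ++ [e]).filter (fun e' => e'.2.1 == e.2.1) = [e] := by
          rw [List.filter_append, hgrp]; simp
        have h2 : (es ++ [e]).filter (fun e' => e'.2.1 == e.2.1 && e'.2.2 == e.2.2) = [e] := by
          rw [List.filter_append]
          have : es.filter (fun e' => e'.2.1 == e.2.1 && e'.2.2 == e.2.2) = [] := by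
            rw [List.filter_eq_nil_iff]
            intro e' he' hc
            have h1 : (e'.2.1 == e.2.1) = true := ((Bool.and_eq_true _ _).mp hc).1
            have : e' ∈ es.filter (fun e'' => e''.2.1 == e.2.1) :=
              List.mem_filter.mpr ⟨he', h1⟩
            rw [hgrp] at this
            exact absurd this (List.not_mem_nil)
          rw [this]; simp
        have htopN : pvTop (es ++ [e]) e.2.1 = some e.2.2 := by
          simp only [pvTop, h1]
          simp [PySem.List.max?_id_cons]
        simp only [pvStat, htopN, pvSrcs, h2]
        simp
      rw [if_neg hmem, hstep, PySem.Dict.items_insert_of_not_contains _ _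
        (by rw [PySem.Dict.contains_eq_isSome_get?, hget0]; rfl), ih, List.map_append]
      congr 1
      · apply List.map_congr_left
        intro t htK
        rw [hother t (fun h => hmem (h ▸ htK))]
      · simp [hstat']

-- ---- B's bucket fold characterized over the same flat edge list ----
def pvGStep (b : PySem.Dict String (List (String × Int))) (e : String × String × Int) :
    PySem.Dict String (List (String × Int)) :=
  b.modify e.2.1 [] (fun l => l ++ [(e.1, e.2.2)])

def pvGrp (es : List (String × String × Int)) (t : String) : List (String × Int) :=
  (es.filter (fun e => e.2.1 == t)).map (fun e => (e.1, e.2.2))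

lemma pv_collect_eq_edge_fold (xs : List (String × List (String × Int)))
    (b : PySem.Dict String (List (String × Int))) :
    xs.foldl pvB_collect b = (pvB_edges xs).foldl pvGStep b := by
  induction xs generalizing b with
  | nil => rfl
  | cons r t ih =>
    rw [List.foldl_cons, pvB_edges, List.flatMap_cons, List.foldl_append]
    have hrow : pvB_collect b r = (pvB_forward r).foldl pvGStep b := by
      unfold pvB_collect pvB_forward
      cases hm : PySem.List.max? (r.2.map (fun q => q.2)) (fun y => y) with
      | none => rfl
      | some top =>
        simp only [List.foldl_map]
        induction r.2 generalizing b with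
        | nil => rfl
        | cons q u ihq =>
          by_cases hq : (q.2 == top) = true
          · simp only [List.foldl_cons, List.filter_cons, hq, if_true]
            exact ihq _
          · simp only [List.foldl_cons, List.filter_cons, hq, if_false, Bool.false_eq_true]
            exact ihq _
    rw [hrow, ih]
    rfl

-- d.items recovered from nodup keys and lookups
lemma pv_items_eq_keys_map (d : PySem.Dict String (List (String × Int)))
    (h : d.keys.Nodup) :
    d.items = d.keys.map (fun k => (k, d.getD k [])) := by
  obtain ⟨l⟩ := d
  induction l with
  | nil => rfl
  | cons p rest ih =>
    have hk : (PySem.Dict.mk (p :: rest)).keys = p.1 :: (PySem.Dict.mk rest).keys := rfl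
    have hi : (PySem.Dict.mk (p :: rest)).items = p :: (PySem.Dict.mk rest).items := rfl
    rw [hk] at h
    have hnd := List.nodup_cons.mp h
    have hhead : (PySem.Dict.mk (p :: rest)).getD p.1 [] = p.2 := by
      rw [PySem.Dict.getD_eq_get?_getD, PySem.Dict.get?_mk_cons]
      simp
    have htail : ∀ k ∈ (PySem.Dict.mk rest).keys,
        (PySem.Dict.mk (p :: rest)).getD k [] = (PySem.Dict.mk rest).getD k [] := by
      intro k hkmem
      have hne : ¬ (p.1 == k) = true := by
        simpa using fun hpk => hnd.1 (by simpa [← hpk] using hkmem)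
      rw [PySem.Dict.getD_eq_get?_getD, PySem.Dict.get?_mk_cons, if_neg hne,
        ← PySem.Dict.getD_eq_get?_getD]
    have htl : (PySem.Dict.mk rest).keys.map
          (fun k => (k, (PySem.Dict.mk (p :: rest)).getD k []))
        = (PySem.Dict.mk rest).keys.map (fun k => (k, (PySem.Dict.mk rest).getD k [])) :=
      List.map_congr_left (fun k hkmem => by rw [htail k hkmem])
    rw [hi, hk, List.map_cons, hhead, htl, ih hnd.2]

lemma pv_bucket_items (es : List (String × String × Int)) :
    (es.foldl pvGStep PySem.Dict.empty).items
      = (PySem.List.dedup (es.map (fun e => e.2.1))).map (fun t => (t, pvGrp es t)) := by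
  have hfold : es.foldl pvGStep PySem.Dict.empty
      = (es.map (fun e => (e.2.1, (e.1, e.2.2)))).foldl
          (fun d p => d.modify p.1 [] (fun x => x ++ [p.2])) PySem.Dict.empty := by
    rw [List.foldl_map]
    rfl
  have hkeys : (es.foldl pvGStep PySem.Dict.empty).keys
      = PySem.List.dedup (es.map (fun e => e.2.1)) := by
    have := PySem.Dict.keys_foldl_modify_key es (fun e => e.2.1) ([] : List (String × Int))
      (fun _ e => fun l => l ++ [(e.1, e.2.2)]) PySem.Dict.empty
    rw [show (fun (d : PySem.Dict String (List (String × Int))) (x : String × String × Int) =>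
        d.modify x.2.1 [] ((fun _ e => fun l => l ++ [(e.1, e.2.2)]) d x)) = pvGStep from rfl] at this
    rw [this, PySem.List.dedup_eq_ofList, PySem.Set.ofList_eq_foldl]
    rfl
  have hnd : (es.foldl pvGStep PySem.Dict.empty).keys.Nodup := by
    rw [hkeys]
    exact PySem.List.nodup_dedup _
  have hgetD : ∀ t, (es.foldl pvGStep PySem.Dict.empty).getD t [] = pvGrp es t := by
    intro t
    rw [hfold, PySem.Dict.getD_foldl_modify_append]
    rw [pvGrp, List.filter_map]
    simp [Function.comp_def]
  rw [pv_items_eq_keys_map _ hnd, hkeys]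
  exact List.map_congr_left (fun t _ => by rw [hgetD])

-- the intermediate form equals B
lemma pv_mid_eq_alt (xs : List (String × List (String × Int))) :
    pvMid xs = bilateral_max_assign_alt xs := by
  unfold pvMid bilateral_max_assign_alt
  simp only []
  rw [pv_fold_eq_edges, pv_edge_fold_char, pv_collect_eq_edge_fold, pv_bucket_items,
    List.foldl_map, List.foldl_map]
  congr 2
  apply PySem.List.foldl_congr_mem'
  intro t ht r
  obtain ⟨m, htop, hstat⟩ := pv_stat_of_mem (pvB_edges xs) t ht
  have htopG : PySem.List.max? ((pvGrp (pvB_edges xs) t).map (fun q => q.2)) (fun y => y)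
      = some m := by
    rw [pvGrp, List.map_map]
    exact htop
  have hsrcs : ((pvGrp (pvB_edges xs) t).filter (fun q => q.2 == m)).map (fun q => q.1)
      = pvSrcs (pvB_edges xs) t m := by
    rw [pvGrp, List.filter_map, List.map_map, pvSrcs]
    rw [show ((fun (q : String × Int) => q.2 == m) ∘
        (fun (e : String × String × Int) => (e.1, e.2.2))) = fun e => e.2.2 == m from rfl]
    rw [List.filter_filter]
    congr 1
    · exact List.filter_congr (fun e _ => by rw [Bool.and_comm])
  simp only [hstat, pvB_emit, htopG, hsrcs]

-- ===== VERDICT (by name: the statement is the Claim_ definition above) =====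
theorem bilateral_max_assign_spec : Claim_equal_bilateral_max_assign := by
  intro xs _ hpre
  unfold Spec_bilateral_max_assign
  rw [pv_A_eq_mid xs hpre, pv_mid_eq_alt]
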